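-- pv_equiv track=rewrite | github.com/Roberia-yagi/template_reconstruction | Old/MI_convert_features_FT/step1/step1_finetune_facenet.py | compress_labels
-- ===== SOURCE A (Python) =====
-- from typing import Any, Tuple, List, Dict
--
-- def compress_labels(labels: List[int]) -> Dict[int, int]:
--     label_map = {}
--
--     index = 0
--     for label in labels:
--         if label not in label_map:
--             label_map[label] = index
--             index += 1
--
--     return label_map
-- ===== SOURCE B (Python) =====
-- def compress_labels(labels):
--     first = {}
--     for pos in range(len(labels) - 1, -1, -1):
--         first[labels[pos]] = pos
--     return {label: i for i, label in enumerate(sorted(first, key=first.get))}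
-- ===== Notes on version B (the rewrite author's own statement) =====
-- stated objective: alternative
-- what changed: B replaces A's single conditional pass (membership test + manual index counter) by a reverse traversal that records each label's first-occurrence position by plain dict overwrite, then sorts the distinct labels by that position and enumerates them.
import Mathlib
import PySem

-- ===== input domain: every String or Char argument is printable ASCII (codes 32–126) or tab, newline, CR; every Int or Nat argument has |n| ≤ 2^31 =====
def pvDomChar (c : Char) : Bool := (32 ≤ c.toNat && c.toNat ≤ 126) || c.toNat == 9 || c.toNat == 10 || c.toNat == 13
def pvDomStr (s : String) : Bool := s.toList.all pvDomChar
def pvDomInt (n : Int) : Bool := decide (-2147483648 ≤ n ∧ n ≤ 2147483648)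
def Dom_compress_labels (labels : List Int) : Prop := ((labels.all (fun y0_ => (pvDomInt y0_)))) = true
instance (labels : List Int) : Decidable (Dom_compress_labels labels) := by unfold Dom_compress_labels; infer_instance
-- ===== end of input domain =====

-- B replaces A's conditional pass (membership test + manual index counter) by a reverse
-- traversal recording each label's first-occurrence position by plain overwrite, then a
-- sort of the distinct labels by that position (alternative decomposition; same result).

-- ===== PORT A =====
-- label_map starts empty, index starts at 0; for each label, if absent insert it at the
-- current index and bump the index; return the dict (as its items list).
def compress_labels (labels : List Int) : List (Int × Int) :=
  (labels.foldl
    (fun (st : PySem.Dict Int Int × Int) label =>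
      if st.1.contains label = false then (st.1.insert label st.2, st.2 + 1) else st)
    (PySem.Dict.empty, 0)).1.items

-- ===== PORT B =====
-- for pos in range(len(labels)-1, -1, -1): first[labels[pos]] = pos  — positions produced
-- by pyRange are always in range, so pyGetD's default 0 is never used (exact);
-- then {label: i for i, label in enumerate(sorted(first, key=first.get))}.
def compress_labels_alt (labels : List Int) : List (Int × Int) :=
  let first := (PySem.List.pyRange ((labels.length : Int) - 1) (-1) (-1)).foldl
      (fun (d : PySem.Dict Int Int) pos => d.insert (PySem.List.pyGetD labels pos 0) pos)
      PySem.Dict.empty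
  (PySem.List.enumerate (PySem.List.sorted first.keys (fun k => first.getD k 0) false) 0).map
    (fun p => (p.2, p.1))

-- ===== PRECONDITION & SPEC =====
def Spec_compress_labels (labels : List Int) (out : List (Int × Int)) : Prop := out = compress_labels_alt labels
instance (labels : List Int) (out : List (Int × Int)) : Decidable (Spec_compress_labels labels out) := by unfold Spec_compress_labels; infer_instance

-- ===== CLAIM (what is proved, stated in full; the proofs are below) =====
def Claim_equal_compress_labels : Prop := ∀ (labels : List Int), Dom_compress_labels labels → Spec_compress_labels labels (compress_labels labels)

-- ===== LEMMAS AND PROOFS =====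

-- loop invariant for A: after processing a prefix whose ordered-distinct labels are u,
-- A's state is (the dict whose items enumerate u, u.length).
theorem compress_labels_loop (ls : List Int) : ∀ (u : List Int), u.Nodup →
    ls.foldl
      (fun (st : PySem.Dict Int Int × Int) label =>
        if st.1.contains label = false then (st.1.insert label st.2, st.2 + 1) else st)
      (PySem.Dict.mk ((PySem.List.enumerate u 0).map (fun p => (p.2, p.1))), (u.length : Int))
    = (PySem.Dict.mk ((PySem.List.enumerate (PySem.Set.update u ls) 0).map (fun p => (p.2, p.1))),
       ((PySem.Set.update u ls).length : Int)) := by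
  induction ls with
  | nil => intro u hu; rfl
  | cons x ls ih =>
    intro u hu
    have hkeys : (PySem.Dict.mk ((PySem.List.enumerate u 0).map (fun p => (p.2, p.1)))).keys = u := by
      simp [PySem.Dict.keys, Function.comp_def, PySem.List.map_snd_enumerate]
    have hcont : (PySem.Dict.mk ((PySem.List.enumerate u 0).map (fun p => (p.2, p.1)))).contains x
        = decide (x ∈ u) := by
      rw [PySem.Dict.contains_eq_decide_mem_keys, hkeys]
    by_cases hx : x ∈ u
    · have hup : PySem.Set.update u (x :: ls) = PySem.Set.update u ls := by
        simp only [PySem.Set.update, List.foldl_cons, PySem.Set.add, PySem.Set.contains]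
        simp [hx]
      simp only [List.foldl_cons, hcont]
      simp only [hx, decide_true]
      rw [hup]; exact ih u hu
    · have hadd : PySem.Set.add u x = u ++ [x] := by
        simp [PySem.Set.add, PySem.Set.contains, hx]
      have hne : (PySem.Dict.mk ((PySem.List.enumerate u 0).map (fun p => (p.2, p.1)))).contains x = false := by
        rw [hcont]; simp [hx]
      have hins : (PySem.Dict.mk ((PySem.List.enumerate u 0).map (fun p => (p.2, p.1)))).insert x (u.length : Int)
          = PySem.Dict.mk ((PySem.List.enumerate (u ++ [x]) 0).map (fun p => (p.2, p.1))) := by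
        apply PySem.Dict.ext
        rw [PySem.Dict.items_insert, hne]
        simp [PySem.List.enumerate_append, PySem.List.enumerate_cons]
      have hnu : (u ++ [x]).Nodup := by
        have hne' : ∀ a ∈ u, ¬ a = x := fun a ha hax => hx (hax ▸ ha)
        simpa [List.nodup_append, hu] using hne'
      have hlen : (u.length : Int) + 1 = ((u ++ [x]).length : Int) := by
        simp [List.length_append]
      have hup : PySem.Set.update u (x :: ls) = PySem.Set.update (u ++ [x]) ls := by
        simp only [PySem.Set.update, List.foldl_cons, hadd]
      simp only [List.foldl_cons, hcont]
      simp only [hx, decide_false, reduceIte]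
      rw [hins, hlen, ih (u ++ [x]) hnu, hup]

-- Set.add on a list starting with x, for an element ≠ x, keeps x in front.
theorem add_cons_ne (x y : Int) (s : List Int) (h : y ≠ x) :
    PySem.Set.add (x :: s) y = x :: PySem.Set.add s y := by
  simp [PySem.Set.add, PySem.Set.contains, h]
  split_ifs <;> simp_all

-- folding Set.add over a list avoiding x keeps x in front of the accumulator.
theorem foldl_add_cons (ys : List Int) : ∀ (x : Int) (s : List Int), x ∉ ys →
    ys.foldl PySem.Set.add (x :: s) = x :: ys.foldl PySem.Set.add s := by
  induction ys with
  | nil => intro x s _; rfl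
  | cons y ys ih =>
    intro x s hx
    have hyx : y ≠ x := fun h => hx (by simp [h])
    simp only [List.foldl_cons, add_cons_ne x y s hyx]
    exact ih x _ (fun h => hx (by simp [h]))

-- elements equal to x (already in the accumulator) may be filtered out of the fold list.
theorem foldl_add_filter (ys : List Int) : ∀ (x : Int) (s : List Int), x ∈ s →
    ys.foldl PySem.Set.add s = (ys.filter (fun l => l ≠ x)).foldl PySem.Set.add s := by
  induction ys with
  | nil => intro _ _ _; rfl
  | cons y ys ih =>
    intro x s hx
    by_cases hyx : y = x
    · subst hyx
      have hadd : PySem.Set.add s y = s := by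
        simp [PySem.Set.add, PySem.Set.contains, hx]
      simp only [List.foldl_cons, List.filter_cons, hadd]
      simpa using ih y s hx
    · have hxadd : x ∈ PySem.Set.add s y := by
        simp [PySem.Set.add]; split_ifs <;> simp [hx]
      simp only [List.foldl_cons, List.filter_cons]
      simp only [hyx, decide_true, ne_eq, not_false_iff, if_true]
      simpa using ih x (PySem.Set.add s y) hxadd

-- the ordered dedup of x :: xs is x followed by the dedup of the x-free tail.
theorem dedup_cons_filter (x : Int) (xs : List Int) :
    PySem.List.dedup (x :: xs) = x :: PySem.List.dedup (xs.filter (fun l => l ≠ x)) := by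
  have h1 : PySem.List.dedup (x :: xs) = xs.foldl PySem.Set.add [x] := by
    simp [PySem.List.dedup_eq_ofList, PySem.Set.ofList_eq_foldl, PySem.Set.add,
      PySem.Set.contains]
  have h2 : xs.foldl PySem.Set.add [x]
      = (xs.filter (fun l => l ≠ x)).foldl PySem.Set.add [x] :=
    foldl_add_filter xs x [x] (by simp)
  have hnotin : x ∉ xs.filter (fun l => l ≠ x) := by
    intro h; simpa using (List.of_mem_filter h)
  rw [h1, h2, foldl_add_cons _ x [] hnotin]
  simp [PySem.List.dedup_eq_ofList, PySem.Set.ofList_eq_foldl]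

-- the reverse index loop building `first` is a right fold over the enumeration.
theorem firstDict_eq_foldr (labels : List Int) :
    (PySem.List.pyRange ((labels.length : Int) - 1) (-1) (-1)).foldl
        (fun (d : PySem.Dict Int Int) pos => d.insert (PySem.List.pyGetD labels pos 0) pos)
        PySem.Dict.empty
    = (PySem.List.enumerate labels 0).foldr
        (fun (p : Int × Int) (d : PySem.Dict Int Int) => d.insert p.2 p.1)
        PySem.Dict.empty := by
  rw [PySem.List.pyRange_neg_one_eq_reverse]
  rw [show ((-1 : Int) + 1) = 0 from rfl, show ((labels.length : Int) - 1 + 1) = (labels.length : Int) by ring]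
  rw [List.foldl_reverse]
  rw [PySem.List.enumerate_eq_map_pyRange labels 0, List.foldr_map]
  simp [PySem.List.len]

-- the final value stored for k is s + (first index of k), none if k is absent.
theorem get?_foldr_enumerate (ls : List Int) : ∀ (s k : Int),
    ((PySem.List.enumerate ls s).foldr
        (fun (p : Int × Int) (d : PySem.Dict Int Int) => d.insert p.2 p.1)
        PySem.Dict.empty).get? k
    = (PySem.List.index? ls k).map (fun i => s + (i : Int)) := by
  induction ls with
  | nil => intro s k; simp [PySem.List.enumerate_nil, PySem.Dict.get?_empty]
  | cons x rest ih =>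
    intro s k
    rw [PySem.List.enumerate_cons, List.foldr_cons, PySem.Dict.get?_insert]
    by_cases hkx : k = x
    · subst hkx
      rw [if_pos rfl, PySem.List.index?_cons_self]
      simp
    · have hxk : x ≠ k := fun h => hkx h.symm
      rw [if_neg hkx, ih (s + 1) k, PySem.List.index?_cons_of_ne rest hxk]
      cases PySem.List.index? rest k with
      | none => rfl
      | some i => simp; ring

-- idxOf? is some idxOf on members.
theorem idxOf?_of_mem (ls : List Int) : ∀ (k : Int), k ∈ ls → ls.idxOf? k = some (ls.idxOf k) := by
  induction ls with
  | nil => intro k h; cases h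
  | cons x rest ih =>
    intro k h
    by_cases hkx : x = k
    · subst hkx
      simp [List.idxOf?_cons, List.idxOf_cons_self]
    · have hk : k ∈ rest := by
        rcases List.mem_cons.mp h with h' | h'
        · exact absurd h'.symm hkx
        · exact h'
      simp [List.idxOf?_cons, hkx, List.idxOf_cons_ne _ hkx, ih k hk]

-- filtering out one value preserves the order of first occurrences of the rest.
theorem idxOf_mono_filter (xs : List Int) : ∀ (x a b : Int), a ≠ x → b ≠ x →
    a ∈ xs.filter (fun l => l ≠ x) → b ∈ xs.filter (fun l => l ≠ x) →
    (xs.filter (fun l => l ≠ x)).idxOf a < (xs.filter (fun l => l ≠ x)).idxOf b →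
    xs.idxOf a < xs.idxOf b := by
  induction xs with
  | nil => intro x a b _ _ ha _ _; simp [List.filter_nil] at ha
  | cons y xs ih =>
    intro x a b hax hbx ha hb hlt
    by_cases hyx : y = x
    · subst hyx
      have hfil : (y :: xs).filter (fun l => l ≠ y) = xs.filter (fun l => l ≠ y) := by
        simp
      rw [hfil] at ha hb hlt
      have hay : y ≠ a := fun h => hax h.symm
      have hby : y ≠ b := fun h => hbx h.symm
      rw [List.idxOf_cons_ne _ hay, List.idxOf_cons_ne _ hby]
      exact Nat.succ_lt_succ (ih y a b hax hbx ha hb hlt)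
    · have hfil : (y :: xs).filter (fun l => l ≠ x) = y :: xs.filter (fun l => l ≠ x) := by
        simp [hyx]
      rw [hfil] at ha hb hlt
      by_cases hby : y = b
      · subst hby
        rw [List.idxOf_cons_self] at hlt; omega
      · by_cases hay : y = a
        · subst hay
          rw [List.idxOf_cons_self]
          rw [List.idxOf_cons_ne _ hby]
          omega
        · rw [List.idxOf_cons_ne _ hay, List.idxOf_cons_ne _ hby] at hlt
          rw [List.idxOf_cons_ne _ hay, List.idxOf_cons_ne _ hby]
          simp only [Nat.succ_eq_add_one] at hlt ⊢
          have ha' : a ∈ xs.filter (fun l => l ≠ x) := by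
            rcases List.mem_cons.mp ha with h' | h'
            · exact absurd h'.symm hay
            · exact h'
          have hb' : b ∈ xs.filter (fun l => l ≠ x) := by
            rcases List.mem_cons.mp hb with h' | h'
            · exact absurd h'.symm hby
            · exact h'
          exact Nat.succ_lt_succ (ih x a b hax hbx ha' hb' (by omega))

-- along the ordered dedup, first-occurrence indices strictly increase.
theorem pairwise_idxOf_dedup (xs : List Int) :
    (PySem.List.dedup xs).Pairwise (fun a b => xs.idxOf a < xs.idxOf b) := by
  suffices h : ∀ (n : Nat) (ls : List Int), ls.length ≤ n →
      (PySem.List.dedup ls).Pairwise (fun a b => ls.idxOf a < ls.idxOf b) from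
    h xs.length xs le_rfl
  intro n
  induction n with
  | zero =>
    intro ls hls
    have : ls = [] := List.eq_nil_of_length_eq_zero (Nat.le_zero.mp hls)
    subst this; simp [PySem.List.dedup_eq_ofList, PySem.Set.ofList_nil]
  | succ n ih =>
    intro ls hls
    match ls with
    | [] => simp [PySem.List.dedup_eq_ofList, PySem.Set.ofList_nil]
    | x :: rest =>
      rw [dedup_cons_filter]
      have hlen : (rest.filter (fun l => l ≠ x)).length ≤ n := by
        have h := List.length_filter_le (fun l => decide (l ≠ x)) rest
        simp only [List.length_cons] at hls
        simp only [ne_eq] at h ⊢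
        omega
      constructor
      · intro b hb
        have hbf : b ∈ rest.filter (fun l => l ≠ x) := (PySem.List.mem_dedup _ _).mp hb
        have hbx : b ≠ x := by simpa using (List.of_mem_filter hbf)
        have hxb : x ≠ b := fun h => hbx h.symm
        rw [List.idxOf_cons_self, List.idxOf_cons_ne _ hxb]
        omega
      · have hpw := ih (rest.filter (fun l => l ≠ x)) hlen
        refine List.Pairwise.imp_of_mem ?_ hpw
        intro a b ha hb hab
        have haf : a ∈ rest.filter (fun l => l ≠ x) := (PySem.List.mem_dedup _ _).mp ha
        have hbf : b ∈ rest.filter (fun l => l ≠ x) := (PySem.List.mem_dedup _ _).mp hb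
        have hax : a ≠ x := by simpa using (List.of_mem_filter haf)
        have hbx : b ≠ x := by simpa using (List.of_mem_filter hbf)
        have hxa : x ≠ a := fun h => hax h.symm
        have hxb : x ≠ b := fun h => hbx h.symm
        have := idxOf_mono_filter rest x a b hax hbx haf hbf hab
        rw [List.idxOf_cons_ne _ hxa, List.idxOf_cons_ne _ hxb]
        omega

-- sorting the recorded labels by their first-occurrence position is the ordered dedup.
theorem sorted_keys_eq_dedup (labels : List Int) :
    PySem.List.sorted
      ((PySem.List.pyRange ((labels.length : Int) - 1) (-1) (-1)).foldl
        (fun (d : PySem.Dict Int Int) pos => d.insert (PySem.List.pyGetD labels pos 0) pos)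
        PySem.Dict.empty).keys
      (fun k =>
        ((PySem.List.pyRange ((labels.length : Int) - 1) (-1) (-1)).foldl
          (fun (d : PySem.Dict Int Int) pos => d.insert (PySem.List.pyGetD labels pos 0) pos)
          PySem.Dict.empty).getD k 0) false
    = PySem.List.dedup labels := by
  set first := (PySem.List.pyRange ((labels.length : Int) - 1) (-1) (-1)).foldl
      (fun (d : PySem.Dict Int Int) pos => d.insert (PySem.List.pyGetD labels pos 0) pos)
      PySem.Dict.empty with hfirst
  have hkeys : first.keys = PySem.Set.ofList labels.reverse := by
    rw [hfirst, PySem.Dict.keys_foldl_insert_key]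
    rw [PySem.List.pyRange_neg_one_eq_reverse]
    rw [show ((-1 : Int) + 1) = 0 from rfl,
        show ((labels.length : Int) - 1 + 1) = (labels.length : Int) by ring]
    rw [List.map_reverse, PySem.List.map_pyGetD_pyRange_zero']
    simp [PySem.Set.update_nil_left, PySem.Dict.keys_empty]
  have hgetD : ∀ k, k ∈ labels → first.getD k 0 = (labels.idxOf k : Int) := by
    intro k hk
    rw [hfirst, firstDict_eq_foldr, PySem.Dict.getD_eq_get?_getD, get?_foldr_enumerate]
    rw [PySem.List.index?_eq_idxOf?, idxOf?_of_mem labels k hk]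
    simp
  have hmemkeys : ∀ k, k ∈ first.keys ↔ k ∈ labels := by
    intro k; rw [hkeys, PySem.Set.mem_ofList, List.mem_reverse]
  have hnodupkeys : first.keys.Nodup := by rw [hkeys]; exact PySem.Set.nodup_ofList _
  apply PySem.List.sorted_eq_of_perm_of_pairwise_lt
  · rw [List.perm_ext_iff_of_nodup (PySem.List.nodup_dedup labels) hnodupkeys]
    intro a; rw [PySem.List.mem_dedup, hmemkeys]
  · refine List.Pairwise.imp_of_mem ?_ (pairwise_idxOf_dedup labels)
    intro a b ha hb hab
    have ha' : a ∈ labels := (PySem.List.mem_dedup _ _).mp ha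
    have hb' : b ∈ labels := (PySem.List.mem_dedup _ _).mp hb
    rw [hgetD a ha', hgetD b hb']
    exact_mod_cast hab

-- ===== VERDICT (by name: the statement is the Claim_ definition above) =====
theorem compress_labels_spec : Claim_equal_compress_labels := by
  intro labels _
  show compress_labels labels = compress_labels_alt labels
  unfold compress_labels
  rw [show ((PySem.Dict.empty : PySem.Dict Int Int), (0 : Int))
      = (PySem.Dict.mk ((PySem.List.enumerate ([] : List Int) 0).map (fun p => (p.2, p.1))),
         ((([] : List Int).length : Int))) from rfl]
  rw [compress_labels_loop labels [] List.nodup_nil]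
  show (PySem.List.enumerate (PySem.Set.update [] labels) 0).map (fun p => (p.2, p.1))
      = compress_labels_alt labels
  simp only [compress_labels_alt]
  rw [sorted_keys_eq_dedup]
  simp [PySem.Set.update_nil_left, PySem.List.dedup_eq_ofList]
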